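-- pv_equiv track=rewrite | github.com/PodariuStefan/hangman | src/hangman.py | collection
-- ===== SOURCE A (Python) =====
-- def censored_word_indexer(word, target):
--     return [i for i in range(len(target)) if word[i].upper() == target[i]]
--
-- def collection(dictionary, guess, target): # dont forget to remove the potential list for less letter search
--     priority = []
--     for word in dictionary:
--         if len(word.upper()) == len(guess):
--             indicesAll = [i for i in range(len(target)) if (word[i].upper() == guess[i])]
--             used_letters = []
--             if indicesAll == censored_word_indexer(guess, target):
--                 priority.append(word)
--     return priority
-- ===== SOURCE B (Python) =====
-- def _sig(a, b, n):
--     # boolean match signature of a against b on positions 0..n-1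
--     return tuple(a[i].upper() == b[i] for i in range(n))
--
-- def collection(dictionary, guess, target):
--     n = len(target)
--     # stage 1: candidates of the right length
--     candidates = [w for w in dictionary if len(w) == len(guess)]
--     if not candidates:
--         return []
--     # stage 2: index the candidates by their match signature against guess
--     keyed = [(_sig(w, guess, n), w) for w in candidates]
--     groups = {}
--     for k, w in keyed:
--         groups[k] = groups.get(k, []) + [w]
--     # stage 3: one lookup with guess's reveal signature against target
--     return groups.get(_sig(guess, target, n), [])
-- ===== Notes on version B (the rewrite author's own statement) =====
-- stated objective: alternative
-- what changed: A tests each word by rebuilding two index lists (word-vs-guess matches, and the reference guess-vs-target reveal list, recomputed per word) and comparing them; B stages the work: it filters candidates by length, builds a dict indexing candidates by their boolean match-signature tuple, and answers with a single lookup of guess's reveal signature, so the per-word comparison against a recomputed reference disappears.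
import Mathlib
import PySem

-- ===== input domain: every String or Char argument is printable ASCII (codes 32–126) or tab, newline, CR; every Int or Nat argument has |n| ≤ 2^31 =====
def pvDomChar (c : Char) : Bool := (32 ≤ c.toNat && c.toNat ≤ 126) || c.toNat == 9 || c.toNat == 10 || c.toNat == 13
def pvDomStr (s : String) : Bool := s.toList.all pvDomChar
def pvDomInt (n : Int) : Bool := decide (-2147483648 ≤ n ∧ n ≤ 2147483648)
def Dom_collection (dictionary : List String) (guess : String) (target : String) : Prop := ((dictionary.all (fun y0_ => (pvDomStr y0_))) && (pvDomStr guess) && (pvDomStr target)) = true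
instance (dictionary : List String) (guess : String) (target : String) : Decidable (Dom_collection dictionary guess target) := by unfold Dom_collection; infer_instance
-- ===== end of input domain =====

-- B replaces A's per-word rebuild-and-compare of two index lists by a staged signature index:
-- filter candidates by length, group them in a dict keyed by their match-signature, answer by one lookup.

-- ===== PORT A =====
-- word[i] / guess[i] / target[i]: pyGetD is exact under Pre_collection (all indices in range).
def censoredWordIndexer (word : List Char) (target : List Char) : List Int :=
  (PySem.List.pyRange 0 (PySem.Chars.len target) 1).filter
    (fun i => PySem.Chars.upperChar (PySem.List.pyGetD word i ' ') == PySem.List.pyGetD target i ' ')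

def collection (dictionary : List String) (guess : String) (target : String) : List String :=
  dictionary.foldl
    (fun priority word =>
      if PySem.Chars.len (PySem.Chars.upper word.toList) = PySem.Chars.len guess.toList then
        let indicesAll :=
          (PySem.List.pyRange 0 (PySem.Chars.len target.toList) 1).filter
            (fun i => PySem.Chars.upperChar (PySem.List.pyGetD word.toList i ' ') == PySem.List.pyGetD guess.toList i ' ')
        if indicesAll == censoredWordIndexer guess.toList target.toList then priority ++ [word]
        else priority
      else priority) []

-- ===== PORT B =====
-- _sig(a, b, n)
def sigOf (a : List Char) (b : List Char) (n : Int) : List Bool :=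
  (PySem.List.pyRange 0 n 1).map
    (fun i => PySem.Chars.upperChar (PySem.List.pyGetD a i ' ') == PySem.List.pyGetD b i ' ')

def collection_alt (dictionary : List String) (guess : String) (target : String) : List String :=
  let n := PySem.Chars.len target.toList
  let candidates := dictionary.filter (fun w => PySem.Chars.len w.toList == PySem.Chars.len guess.toList)
  if candidates = [] then []
  else
    let keyed := candidates.map (fun w => (sigOf w.toList guess.toList n, w))
    let groups := keyed.foldl (fun d p => d.modify p.1 [] (· ++ [p.2])) PySem.Dict.empty
    groups.getD (sigOf guess.toList target.toList n) []

-- ===== PRECONDITION & SPEC =====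
-- Pre_ excludes exactly the inputs where A raises IndexError: target longer than guess
-- while some dictionary word has guess's length (then word[i]/guess[i] is indexed past the end).
def Pre_collection (dictionary : List String) (guess : String) (target : String) : Prop :=
  PySem.Str.len target ≤ PySem.Str.len guess ∨
  ∀ w ∈ dictionary, PySem.Str.len w ≠ PySem.Str.len guess

instance (dictionary : List String) (guess : String) (target : String) : Decidable (Pre_collection dictionary guess target) := by unfold Pre_collection; infer_instance

def pvWitness_collection : List String × String × String := (["CAT", "dog", "go"], "COG", "C_G")

def Spec_collection (dictionary : List String) (guess : String) (target : String) (out : List String) : Prop := out = collection_alt dictionary guess target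
instance (dictionary : List String) (guess : String) (target : String) (out : List String) : Decidable (Spec_collection dictionary guess target out) := by unfold Spec_collection; infer_instance

-- ===== CLAIM (what is proved, stated in full; the proofs are below) =====
def Claim_equal_collection : Prop := ∀ (dictionary : List String) (guess : String) (target : String), Dom_collection dictionary guess target → Pre_collection dictionary guess target → Spec_collection dictionary guess target (collection dictionary guess target)

-- ===== LEMMAS AND PROOFS =====

-- On a duplicate-free list, the two filters coincide iff the predicates agree on every element.
theorem filter_eq_filter_iff_of_nodup {α : Type} (l : List α) (hl : l.Nodup) (p q : α → Bool) :
    l.filter p = l.filter q ↔ ∀ x ∈ l, p x = q x := by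
  induction l with
  | nil => simp
  | cons a t ih =>
    rcases List.nodup_cons.mp hl with ⟨ha, ht⟩
    by_cases hp : p a = true <;> by_cases hq : q a = true <;>
      simp [hp, hq, ih ht]
    · intro h
      have : a ∈ t.filter q := h ▸ List.mem_cons_self
      exact absurd (List.mem_of_mem_filter this) ha
    · intro h
      have : a ∈ t.filter p := h.symm ▸ List.mem_cons_self
      exact absurd (List.mem_of_mem_filter this) ha

-- per-word test equivalence: A's "index lists equal" is B's "signature equals reveal signature"
theorem perWord (word guess target : List Char) :
    (((PySem.List.pyRange 0 (PySem.Chars.len target) 1).filter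
        (fun i => PySem.Chars.upperChar (PySem.List.pyGetD word i ' ') == PySem.List.pyGetD guess i ' '))
      == censoredWordIndexer guess target)
    = (sigOf word guess (PySem.Chars.len target) == sigOf guess target (PySem.Chars.len target)) := by
  rw [Bool.eq_iff_iff]
  simp only [beq_iff_eq, censoredWordIndexer, sigOf]
  rw [filter_eq_filter_iff_of_nodup _ (PySem.List.nodup_pyRange_one 0 (PySem.Chars.len target)),
    List.map_inj_left]

theorem len_upper (cs : List Char) : (PySem.Chars.upper cs).length = cs.length := by
  simp [PySem.Chars.upper]

-- A's fold is a filter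
theorem collection_eq_filter (dictionary : List String) (guess target : String) :
    collection dictionary guess target
      = dictionary.filter (fun w =>
          (PySem.Chars.len w.toList == PySem.Chars.len guess.toList) &&
          (sigOf w.toList guess.toList (PySem.Chars.len target.toList)
            == sigOf guess.toList target.toList (PySem.Chars.len target.toList))) := by
  unfold collection
  rw [PySem.List.foldl_congr_mem'
      (g := fun acc w =>
        if ((PySem.Chars.len w.toList == PySem.Chars.len guess.toList) &&
            (sigOf w.toList guess.toList (PySem.Chars.len target.toList)
              == sigOf guess.toList target.toList (PySem.Chars.len target.toList))) = true
        then acc ++ [w] else acc)]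
  · rw [PySem.List.foldl_append_if_eq_filter, List.nil_append]
  · intro w _ acc
    rw [← perWord]
    by_cases h1 : PySem.Chars.len (PySem.Chars.upper w.toList) = PySem.Chars.len guess.toList
    · have hlen : (PySem.Chars.len w.toList == PySem.Chars.len guess.toList) = true := by
        simp only [PySem.Chars.len_eq] at h1 ⊢
        rw [len_upper] at h1
        simpa using h1
      simp only [if_pos h1, hlen, Bool.true_and]
    · have hlen : (PySem.Chars.len w.toList == PySem.Chars.len guess.toList) = false := by
        simp only [PySem.Chars.len_eq] at h1 ⊢
        rw [len_upper] at h1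
        simpa using h1
      simp only [if_neg h1, hlen, Bool.false_and, Bool.false_eq_true, if_false]

-- ===== VERDICT (by name: the statement is the Claim_ definition above) =====
theorem collection_spec : Claim_equal_collection := by
  intro dictionary guess target _ _
  unfold Spec_collection collection_alt
  rw [collection_eq_filter]
  by_cases hc : dictionary.filter
      (fun w => PySem.Chars.len w.toList == PySem.Chars.len guess.toList) = []
  · rw [if_pos hc, List.filter_eq_nil_iff]
    intro w hw
    have hlen := (List.filter_eq_nil_iff.mp hc) w hw
    simp only [Bool.not_eq_true] at hlen ⊢
    rw [hlen, Bool.false_and]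
  · rw [if_neg hc, PySem.Dict.getD_foldl_modify_append, PySem.Dict.getD_empty,
      List.nil_append, List.filter_map]
    simp only [Function.comp_def, List.map_map]
    simp only [List.map_id', List.filter_filter]
    exact List.filter_congr (fun w _ => Bool.and_comm _ _)
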